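-- pv_equiv track=rewrite | github.com/xdzhang11/sensitivity_analysis | shapley/forest.py | get_pos
-- ===== SOURCE A (Python) =====
-- def get_pos(dim, j1, j2):
--     """
--     """
--     k = 0
--     for i in range(1, dim):
--         for j in range(i):
--             if i == j1 and j == j2:
--                 return k
--             elif i == j2 and j == j1:
--                 return k
--             k += 1
-- ===== SOURCE B (Python) =====
-- def get_pos(dim, j1, j2):
--     a, b = (j1, j2) if j1 >= j2 else (j2, j1)
--     if 0 <= b < a < dim:
--         return a * (a - 1) // 2 + b
--     return None
-- ===== Notes on version B (the rewrite author's own statement) =====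
-- stated objective: faster
-- what changed: Replaced the nested scan over all unordered pairs by the closed-form triangular-number index a*(a-1)//2 + b (a=max, b=min) guarded by a validity check.
import Mathlib
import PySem

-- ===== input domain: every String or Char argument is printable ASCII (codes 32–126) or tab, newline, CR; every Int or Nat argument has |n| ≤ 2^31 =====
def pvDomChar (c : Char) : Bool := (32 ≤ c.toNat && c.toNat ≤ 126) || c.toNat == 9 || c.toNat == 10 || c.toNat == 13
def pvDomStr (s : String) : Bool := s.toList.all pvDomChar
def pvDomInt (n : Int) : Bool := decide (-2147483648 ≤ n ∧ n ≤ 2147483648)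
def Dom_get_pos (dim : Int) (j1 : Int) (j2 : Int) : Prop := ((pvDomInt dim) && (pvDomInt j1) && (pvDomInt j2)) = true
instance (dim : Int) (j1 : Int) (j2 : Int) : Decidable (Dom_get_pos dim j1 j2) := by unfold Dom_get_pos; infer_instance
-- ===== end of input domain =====

-- B replaces A's quadratic scan over all unordered pairs by the closed-form
-- triangular index a*(a-1)//2 + b (a = max, b = min) with a validity check; O(1) vs O(dim^2).

-- ===== PORT A =====
-- inner 'for j in range(i)' loop: state k, may return early
def getPosInner (j1 j2 i : Int) (k : Int) : List Int → Option Int × Int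
  | [] => (none, k)
  | j :: rest =>
    if i = j1 ∧ j = j2 then (some k, k)
    else if i = j2 ∧ j = j1 then (some k, k)
    else getPosInner j1 j2 i (k + 1) rest

-- outer 'for i in range(1, dim)' loop
def getPosOuter (j1 j2 : Int) (k : Int) : List Int → Option Int
  | [] => none
  | i :: rest =>
    match getPosInner j1 j2 i k (PySem.List.pyRange 0 i 1) with
    | (some r, _) => some r
    | (none, k') => getPosOuter j1 j2 k' rest

def get_pos (dim : Int) (j1 : Int) (j2 : Int) : Option Int :=
  getPosOuter j1 j2 0 (PySem.List.pyRange 1 dim 1)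

-- ===== PORT B =====
def get_pos_alt (dim : Int) (j1 : Int) (j2 : Int) : Option Int :=
  let p : Int × Int := if j1 ≥ j2 then (j1, j2) else (j2, j1)
  if 0 ≤ p.2 ∧ p.2 < p.1 ∧ p.1 < dim then
    some (PySem.Int.floordiv (p.1 * (p.1 - 1)) 2 + p.2)
  else
    none

-- ===== PRECONDITION & SPEC =====
def Spec_get_pos (dim : Int) (j1 : Int) (j2 : Int) (out : Option Int) : Prop := out = get_pos_alt dim j1 j2
instance (dim : Int) (j1 : Int) (j2 : Int) (out : Option Int) : Decidable (Spec_get_pos dim j1 j2 out) := by unfold Spec_get_pos; infer_instance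

-- ===== CLAIM (what is proved, stated in full; the proofs are below) =====
def Claim_equal_get_pos : Prop := ∀ (dim : Int) (j1 : Int) (j2 : Int), Dom_get_pos dim j1 j2 → Spec_get_pos dim j1 j2 (get_pos dim j1 j2)

-- ===== LEMMAS AND PROOFS =====

-- the inner loop over range(s, s+n) finds the partner of i (if i matches j1 or j2)
lemma getPosInner_pyRange (j1 j2 i : Int) : ∀ (n : Nat) (s k : Int),
    getPosInner j1 j2 i k (PySem.List.pyRange s (s + n) 1) =
      if i = j1 ∧ s ≤ j2 ∧ j2 < s + n then (some (k + (j2 - s)), k + (j2 - s))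
      else if i = j2 ∧ s ≤ j1 ∧ j1 < s + n then (some (k + (j1 - s)), k + (j1 - s))
      else (none, k + n) := by
  intro n
  induction n with
  | zero =>
    intro s k
    rw [PySem.List.pyRange_one_eq_nil (by omega)]
    simp only [getPosInner]
    rw [if_neg (by omega), if_neg (by omega)]
    simp
  | succ n ih =>
    intro s k
    rw [PySem.List.pyRange_one_cons (by omega : s < s + (n + 1 : Nat))]
    have h1 : s + ((n + 1 : Nat) : Int) = (s + 1) + (n : Nat) := by push_cast; ring
    rw [h1]
    simp only [getPosInner]
    by_cases hA : i = j1 ∧ s = j2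
    · rw [if_pos hA]
      rw [if_pos (by omega : i = j1 ∧ s ≤ j2 ∧ j2 < s + 1 + (n : Nat))]
      have : j2 - s = 0 := by omega
      simp [this]
    · rw [if_neg hA]
      by_cases hB : i = j2 ∧ s = j1
      · rw [if_pos hB]
        by_cases hA' : i = j1 ∧ s ≤ j2 ∧ j2 < s + 1 + (n : Nat)
        · -- then j1 = j2 = i = s, contradicting hA unless s = j2; but s = j1 = j2 here
          exfalso; exact hA ⟨hA'.1, by omega⟩
        · rw [if_neg hA', if_pos (by omega : i = j2 ∧ s ≤ j1 ∧ j1 < s + 1 + (n : Nat))]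
          have : j1 - s = 0 := by omega
          simp [this]
      · rw [if_neg hB, ih (s + 1) (k + 1)]
        by_cases hA' : i = j1 ∧ s + 1 ≤ j2 ∧ j2 < s + 1 + (n : Nat)
        · rw [if_pos hA', if_pos (by omega : i = j1 ∧ s ≤ j2 ∧ j2 < s + 1 + (n : Nat))]
          have : k + 1 + (j2 - (s + 1)) = k + (j2 - s) := by omega
          rw [this]
        · rw [if_neg hA']
          by_cases hB' : i = j2 ∧ s + 1 ≤ j1 ∧ j1 < s + 1 + (n : Nat)
          · rw [if_pos hB']
            rw [if_neg (by intro h; exact hA' ⟨h.1, by by_cases hij : i = j2 <;> omega⟩)]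
            rw [if_pos (by omega : i = j2 ∧ s ≤ j1 ∧ j1 < s + 1 + (n : Nat))]
            have : k + 1 + (j1 - (s + 1)) = k + (j1 - s) := by omega
            rw [this]
          · rw [if_neg hB']
            rw [if_neg (by intro h; exact hA' ⟨h.1, by by_cases hij : i = j1 ∧ s = j2 <;> omega⟩)]
            rw [if_neg (by intro h; exact hB' ⟨h.1, by by_cases hij : i = j2 ∧ s = j1 <;> omega⟩)]
            have : k + 1 + (n : Nat) = k + ((n + 1 : Nat) : Int) := by push_cast; ring
            rw [this]

-- triangular number, written as B writes it
def pvTri (m : Int) : Int := PySem.Int.floordiv (m * (m - 1)) 2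

lemma pvTri_succ (m : Int) : pvTri (m + 1) = pvTri m + m := by
  unfold pvTri
  rw [PySem.Int.floordiv_eq_ediv_of_pos (by norm_num),
      PySem.Int.floordiv_eq_ediv_of_pos (by norm_num)]
  have h : (m + 1) * (m + 1 - 1) = m * (m - 1) + 2 * m := by ring
  rw [h]
  omega

lemma getPosOuter_pyRange (j1 j2 : Int) : ∀ (n : Nat) (m : Int), 1 ≤ m →
    getPosOuter j1 j2 (pvTri m) (PySem.List.pyRange m (m + n) 1) =
      if m ≤ max j1 j2 ∧ max j1 j2 < m + n ∧ 0 ≤ min j1 j2 ∧ min j1 j2 < max j1 j2 then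
        some (pvTri (max j1 j2) + min j1 j2)
      else none := by
  intro n
  induction n with
  | zero =>
    intro m hm
    rw [PySem.List.pyRange_one_eq_nil (by omega)]
    simp only [getPosOuter]
    rw [if_neg (by omega)]
  | succ n ih =>
    intro m hm
    rw [PySem.List.pyRange_one_cons (by omega : m < m + (n + 1 : Nat))]
    have h1 : m + ((n + 1 : Nat) : Int) = (m + 1) + (n : Nat) := by push_cast; ring
    rw [h1]
    simp only [getPosOuter]
    have hm0 : (0 : Int) + (m.toNat : Int) = m := by omega
    have hinner := getPosInner_pyRange j1 j2 m m.toNat 0 (pvTri m)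
    rw [hm0] at hinner
    rw [hinner]
    by_cases hA : m = j1 ∧ 0 ≤ j2 ∧ j2 < m
    · rw [if_pos hA]
      have hmax : max j1 j2 = m := by omega
      have hmin : min j1 j2 = j2 := by omega
      rw [if_pos (by rw [hmax, hmin]; omega)]
      rw [hmax, hmin]
      simp
    · rw [if_neg hA]
      by_cases hB : m = j2 ∧ 0 ≤ j1 ∧ j1 < m
      · rw [if_pos hB]
        have hmax : max j1 j2 = m := by omega
        have hmin : min j1 j2 = j1 := by omega
        rw [if_pos (by rw [hmax, hmin]; omega)]
        rw [hmax, hmin]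
        simp
      · rw [if_neg hB]
        have hk' : pvTri m + (m.toNat : Int) = pvTri (m + 1) := by
          rw [pvTri_succ]; omega
        rw [hk']
        change getPosOuter j1 j2 (pvTri (m + 1)) _ = _
        rw [ih (m + 1) (by omega)]
        by_cases hc : m + 1 ≤ max j1 j2 ∧ max j1 j2 < m + 1 + (n : Nat) ∧ 0 ≤ min j1 j2 ∧ min j1 j2 < max j1 j2
        · rw [if_pos hc, if_pos (by omega)]
        · rw [if_neg hc, if_neg (by omega)]

lemma get_pos_eq_alt (dim j1 j2 : Int) : get_pos dim j1 j2 = get_pos_alt dim j1 j2 := by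
  have hmm : ∀ a b : Int, a = max j1 j2 → b = min j1 j2 →
      get_pos dim j1 j2 = if 0 ≤ b ∧ b < a ∧ a < dim then some (pvTri a + b) else none := by
    intro a b ha hb
    unfold get_pos
    by_cases hd : dim ≤ 1
    · rw [PySem.List.pyRange_one_eq_nil hd]
      simp only [getPosOuter]
      rw [if_neg (by omega)]
    · have hdim : 1 + ((dim - 1).toNat : Int) = dim := by omega
      have houter := getPosOuter_pyRange j1 j2 (dim - 1).toNat 1 le_rfl
      rw [hdim, show pvTri 1 = 0 from by decide] at houter
      rw [houter, ← ha, ← hb]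
      by_cases hg : 0 ≤ b ∧ b < a ∧ a < dim
      · rw [if_pos (by omega), if_pos hg]
      · rw [if_neg (by omega), if_neg hg]
  by_cases hj : j1 ≥ j2
  · rw [hmm j1 j2 (by omega) (by omega)]
    unfold get_pos_alt
    rw [if_pos hj]
    rfl
  · rw [hmm j2 j1 (by omega) (by omega)]
    unfold get_pos_alt
    rw [if_neg hj]
    rfl

-- ===== VERDICT (by name: the statement is the Claim_ definition above) =====
theorem get_pos_spec : Claim_equal_get_pos := by
  intro dim j1 j2 _
  unfold Spec_get_pos
  exact get_pos_eq_alt dim j1 j2
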